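-- pv_equiv track=rewrite | github.com/moontasirabtahee/Learning-Data-Structures-and-Algorithoms-in-python | 00. Assignments [BRACU]/01. Lab_1 Array/Linear Arrays.py | arraySeries
-- ===== SOURCE A (Python) =====
-- def arraySeries(n):
--     array = [0 for i in range(n*n)]
--     index=len(array)-1
--     for i in range(n,0,-1):
--         for j in range(1,n+1):
--             if(j<=i):
--                 array[index]=j
--             index-=1
--
--     return array
-- ===== SOURCE B (Python) =====
-- def arraySeries(n):
--     array = [0] * (n * n)
--     for i in range(1, n + 1):
--         base = (i - 1) * n
--         for o in range(n - i, n):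
--             array[base + o] = n - o
--     return array
-- ===== Notes on version B (the rewrite author's own statement) =====
-- stated objective: simpler
-- what changed: B fills the preallocated array row-by-row in forward order, writing only the non-zero tail of each row with position (base+o) and value (n-o) computed directly, instead of A's backward-moving global index visiting all n*n cells with a per-cell j<=i branch.
import Mathlib
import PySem

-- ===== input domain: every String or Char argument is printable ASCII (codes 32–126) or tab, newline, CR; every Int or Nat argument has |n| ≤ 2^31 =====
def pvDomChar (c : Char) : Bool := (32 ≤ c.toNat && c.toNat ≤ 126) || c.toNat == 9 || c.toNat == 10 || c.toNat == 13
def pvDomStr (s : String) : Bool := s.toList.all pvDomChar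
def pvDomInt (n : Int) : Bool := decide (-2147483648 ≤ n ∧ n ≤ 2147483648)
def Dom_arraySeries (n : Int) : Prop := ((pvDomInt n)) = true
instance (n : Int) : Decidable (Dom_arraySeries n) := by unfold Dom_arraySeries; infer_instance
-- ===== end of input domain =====

-- B rebuilds the same triangular flattening row-by-row in forward order with direct
-- position/value arithmetic, instead of A's backward global index with a per-cell branch
-- (objective: simpler; both programs are total, so no Pre_).

-- ===== PORT A =====
-- inner j-loop of A: writes array[index]=j when j<=i, decrements index each step
-- (array[index]=j is in range whenever executed, so the total pySetD is exact here)
def aInner (n i : Int) (s : List Int × Int) : List Int × Int :=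
  (PySem.List.pyRange 1 (n + 1) 1).foldl
    (fun s j => ((if j ≤ i then PySem.List.pySetD s.1 s.2 j else s.1), s.2 - 1)) s

def arraySeries (n : Int) : List Int :=
  let array : List Int := (PySem.List.pyRange 0 (n * n) 1).map (fun _ => (0 : Int))
  let index : Int := PySem.List.len array - 1
  ((PySem.List.pyRange n 0 (-1)).foldl (fun s i => aInner n i s) (array, index)).1

-- ===== PORT B =====
-- inner o-loop of B: array[base+o] = n-o for o in range(n-i, n)
def bInner (n i : Int) (arr : List Int) : List Int :=
  let base := (i - 1) * n
  (PySem.List.pyRange (n - i) n 1).foldl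
    (fun arr o => PySem.List.pySetD arr (base + o) (n - o)) arr

def arraySeries_alt (n : Int) : List Int :=
  (PySem.List.pyRange 1 (n + 1) 1).foldl (fun arr i => bInner n i arr)
    (PySem.List.pyRepeat [0] (n * n))

-- ===== PRECONDITION & SPEC =====
def Spec_arraySeries (n : Int) (out : List Int) : Prop := out = arraySeries_alt n
instance (n : Int) (out : List Int) : Decidable (Spec_arraySeries n out) := by unfold Spec_arraySeries; infer_instance

-- ===== CLAIM (what is proved, stated in full; the proofs are below) =====
def Claim_equal_arraySeries : Prop := ∀ (n : Int), Dom_arraySeries n → Spec_arraySeries n (arraySeries n)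

-- ===== LEMMAS AND PROOFS =====

-- [v, v-1, ..., v-k+1]
def descVals (v : Int) : Nat → List Int
  | 0 => []
  | k + 1 => v :: descVals (v - 1) k

-- row i of the n×n pattern (0s then i,i-1,...,1)
def rowP (m i : Nat) : List Int := List.replicate (m - i) 0 ++ descVals i i

-- rows 1..k flattened
def frP (m : Nat) : Nat → List Int
  | 0 => []
  | k + 1 => frP m k ++ rowP m (k + 1)

-- rows s+1..s+t flattened (t = fuel)
def frT (m : Nat) : Nat → Nat → List Int
  | _, 0 => []
  | s, t + 1 => rowP m (s + 1) ++ frT m (s + 1) t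

lemma descVals_snoc (v : Int) (k : Nat) :
    descVals v (k + 1) = descVals v k ++ [v - k] := by
  induction k generalizing v with
  | zero => simp [descVals]
  | succ k ih =>
      rw [descVals, ih (v - 1), descVals]
      simp; ring_nf

lemma length_descVals (v : Int) (k : Nat) : (descVals v k).length = k := by
  induction k generalizing v with
  | zero => simp [descVals]
  | succ k ih => simp [descVals, ih]

lemma frT_eq (m : Nat) (t : Nat) : ∀ s, frP m s ++ frT m s t = frP m (s + t) := by
  induction t with
  | zero => intro s; simp [frT]
  | succ t ih =>
      intro s
      rw [frT, ← List.append_assoc, show frP m s ++ rowP m (s+1) = frP m (s+1) from rfl,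
          ih (s+1)]
      congr 1; omega

lemma set_append_len (pre : List Int) (c : Int) (suf : List Int) (v : Int) :
    (pre ++ c :: suf).set pre.length v = pre ++ v :: suf := by
  simp

-- ascending write (B's inner loop shape)
lemma bwrite (nn base : Int) (k : Nat) :
    ∀ (o0 : Int) (pre seg post : List Int), seg.length = k →
      (pre.length : Int) = base + o0 →
      (PySem.List.pyRange o0 (o0 + k) 1).foldl
          (fun arr o => PySem.List.pySetD arr (base + o) (nn - o)) (pre ++ seg ++ post)
        = pre ++ descVals (nn - o0) k ++ post := by
  induction k with
  | zero =>
      intro o0 pre seg post hseg hpre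
      rw [List.length_eq_zero_iff] at hseg; subst hseg
      rw [PySem.List.pyRange_one_eq_nil (by push_cast; omega)]
      simp [descVals]
  | succ k ih =>
      intro o0 pre seg post hseg hpre
      obtain ⟨c, seg', rfl⟩ : ∃ c seg', seg = c :: seg' := by
        cases seg with
        | nil => simp at hseg
        | cons c t => exact ⟨c, t, rfl⟩
      simp only [List.length_cons, Nat.succ.injEq] at hseg
      rw [PySem.List.pyRange_one_cons (by push_cast; omega)]
      simp only [List.foldl_cons]
      have hset : PySem.List.pySetD (pre ++ c :: seg' ++ post) (base + o0) (nn - o0)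
          = (pre ++ [nn - o0]) ++ seg' ++ post := by
        rw [← hpre, PySem.List.pySetD_natCast, List.append_assoc, List.cons_append,
            set_append_len]
        simp
      rw [hset]
      have hrange : PySem.List.pyRange (o0 + 1) (o0 + ((k : Int) + 1)) 1
          = PySem.List.pyRange (o0 + 1) ((o0 + 1) + (k : Int)) 1 := by ring_nf
      have := ih (o0 + 1) (pre ++ [nn - o0]) seg' post hseg
        (by simp; omega)
      rw [show ((k : Int) + 1 : Int) = (((k + 1 : Nat) : Int)) by push_cast; ring] at hrange
      rw [hrange, this]
      simp [descVals]
      ring_nf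

-- descending write with counter, guard always true (A's inner loop, j ≤ i part)
lemma awrite (i : Int) (k : Nat) :
    ∀ (j0 : Int) (pre seg post : List Int), seg.length = k →
      j0 + k - 1 ≤ i →
      (PySem.List.pyRange j0 (j0 + k) 1).foldl
          (fun s j => ((if j ≤ i then PySem.List.pySetD s.1 s.2 j else s.1), s.2 - 1))
          (pre ++ seg ++ post, (pre.length : Int) + k - 1)
        = (pre ++ descVals (j0 + k - 1) k ++ post, (pre.length : Int) - 1) := by
  induction k with
  | zero =>
      intro j0 pre seg post hseg _
      rw [List.length_eq_zero_iff] at hseg; subst hseg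
      rw [PySem.List.pyRange_one_eq_nil (by push_cast; omega)]
      simp [descVals]
  | succ k ih =>
      intro j0 pre seg post hseg hub
      obtain ⟨seg', c, rfl⟩ := seg.eq_nil_or_concat.resolve_left
        (by intro h; subst h; simp at hseg)
      simp only [List.concat_eq_append] at hseg ⊢
      rw [List.length_append, List.length_singleton] at hseg
      rw [PySem.List.pyRange_one_cons (by push_cast; omega)]
      simp only [List.foldl_cons]
      rw [if_pos (by push_cast at hub ⊢; omega)]
      have harr : (pre ++ (seg' ++ [c]) ++ post) = (pre ++ seg') ++ c :: post := by
        simp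
      have hidx : (pre.length : Int) + ((k : Int) + 1) - 1
          = (((pre ++ seg').length : Nat) : Int) := by
        simp; omega
      have hset : PySem.List.pySetD (pre ++ (seg' ++ [c]) ++ post)
            ((pre.length : Int) + ((k + 1 : Nat) : Int) - 1) j0
          = pre ++ seg' ++ (j0 :: post) := by
        rw [harr]; push_cast
        rw [hidx, PySem.List.pySetD_natCast, set_append_len]
      rw [hset]
      have hrange : PySem.List.pyRange (j0 + 1) (j0 + ((k + 1 : Nat) : Int)) 1
          = PySem.List.pyRange (j0 + 1) ((j0 + 1) + (k : Int)) 1 := by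
        push_cast; ring_nf
      have hidx2 : (pre.length : Int) + ((k + 1 : Nat) : Int) - 1 - 1
          = (pre.length : Int) + (k : Int) - 1 := by push_cast; ring
      rw [hrange, hidx2, ih (j0 + 1) pre seg' (j0 :: post) (by omega)
            (by push_cast at hub ⊢; omega)]
      have : descVals (j0 + ((k + 1 : Nat) : Int) - 1) (k + 1)
          = descVals (j0 + (k : Int)) k ++ [j0] := by
        rw [show (j0 + ((k + 1 : Nat) : Int) - 1) = j0 + (k : Int) by push_cast; ring,
            descVals_snoc]
        simp
      rw [show j0 + 1 + (k : Int) - 1 = j0 + (k : Int) from by ring, this]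
      simp

-- guard always false: only the counter moves (A's inner loop, j > i part)
lemma askip (i : Int) (k : Nat) :
    ∀ (j0 : Int) (arr : List Int) (idx : Int), i < j0 →
      (PySem.List.pyRange j0 (j0 + k) 1).foldl
          (fun s j => ((if j ≤ i then PySem.List.pySetD s.1 s.2 j else s.1), s.2 - 1))
          (arr, idx)
        = (arr, idx - k) := by
  induction k with
  | zero =>
      intro j0 arr idx _
      rw [PySem.List.pyRange_one_eq_nil (by push_cast; omega)]
      simp
  | succ k ih =>
      intro j0 arr idx hlb
      rw [PySem.List.pyRange_one_cons (by push_cast; omega)]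
      simp only [List.foldl_cons]
      rw [if_neg (by omega)]
      rw [show (j0 + ((k + 1 : Nat) : Int)) = (j0 + 1) + (k : Int) from by push_cast; ring]
      rw [ih (j0 + 1) arr (idx - 1) (by omega)]
      congr 1
      push_cast; ring

-- A's whole inner loop for 1 ≤ i ≤ m
lemma aInner_eq (m i : Nat) (h1 : 1 ≤ i) (h2 : i ≤ m)
    (pre seg0 seg1 post : List Int) (h0 : seg0.length = m - i) (hs : seg1.length = i) :
    aInner (m : Int) (i : Int) (pre ++ (seg0 ++ (seg1 ++ post)), (pre.length : Int) + m - 1)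
      = (pre ++ (seg0 ++ (descVals i i ++ post)), (pre.length : Int) - 1) := by
  unfold aInner
  rw [PySem.List.pyRange_one_append 1 ((i : Int) + 1) ((m : Int) + 1)
        (by push_cast; omega) (by push_cast; omega), List.foldl_append]
  have harr : pre ++ (seg0 ++ (seg1 ++ post)) = (pre ++ seg0) ++ seg1 ++ post := by simp
  have hidx : (pre.length : Int) + m - 1 = (((pre ++ seg0).length : Nat) : Int) + i - 1 := by
    simp [h0]; omega
  rw [show ((i : Int) + 1) = 1 + (i : Int) from by ring, harr, hidx,
      awrite (i : Int) i 1 (pre ++ seg0) seg1 post hs (by push_cast; omega)]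
  rw [show ((m : Int) + 1) = (1 + (i : Int)) + ((m - i : Nat) : Int) from by omega]
  rw [askip (i : Int) (m - i) (1 + (i : Int)) _ _ (by omega)]
  rw [Prod.mk.injEq]
  refine ⟨?_, ?_⟩
  · rw [show 1 + (i : Int) - 1 = (i : Int) from by ring]; simp
  · simp [h0]; omega

-- A's outer loop, processed blocks on the right
lemma aouter (m : Nat) (k : Nat) : k ≤ m → ∀ (suffix : List Int),
    (PySem.List.pyRange (k : Int) 0 (-1)).foldl (fun s i => aInner (m : Int) i s)
        (List.replicate (k * m) 0 ++ suffix, (k : Int) * m - 1)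
      = (frP m k ++ suffix, -1) := by
  induction k with
  | zero =>
      intro _ suffix
      rw [PySem.List.pyRange_neg_one_eq_nil (by omega)]
      simp [frP]
  | succ k ih =>
      intro hk suffix
      rw [PySem.List.pyRange_neg_one_cons (by push_cast; omega)]
      simp only [List.foldl_cons]
      have hsplit : List.replicate ((k + 1) * m) (0 : Int) ++ suffix
          = List.replicate (k * m) 0 ++ (List.replicate (m - (k + 1)) 0
              ++ (List.replicate (k + 1) 0 ++ suffix)) := by
        rw [show (k + 1) * m = k * m + ((m - (k + 1)) + (k + 1)) from by
              rw [Nat.succ_mul]; omega]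
        simp only [← List.replicate_append_replicate, List.append_assoc]
      have hidx : (((k + 1 : Nat) : Int)) * m - 1
          = (((List.replicate (k * m) (0 : Int)).length : Nat) : Int) + m - 1 := by
        simp; push_cast; ring
      rw [hsplit, hidx,
          aInner_eq m (k + 1) (by omega) (by omega) (List.replicate (k * m) 0)
            (List.replicate (m - (k + 1)) 0) (List.replicate (k + 1) 0) suffix
            (by simp) (by simp)]
      have hstate : (List.replicate (k * m) (0 : Int) ++
            (List.replicate (m - (k + 1)) 0 ++ (descVals ((k + 1 : Nat) : Int) (k + 1) ++ suffix)),
            (((List.replicate (k * m) (0 : Int)).length : Nat) : Int) - 1)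
          = (List.replicate (k * m) (0 : Int) ++ (rowP m (k + 1) ++ suffix), (k : Int) * m - 1) := by
        rw [Prod.mk.injEq]
        refine ⟨by simp [rowP], by push_cast [List.length_replicate]; ring⟩
      rw [show ((k + 1 : Nat) : Int) - 1 = (k : Int) from by push_cast; ring, hstate,
          ih (by omega) (rowP m (k + 1) ++ suffix)]
      simp [frP]

-- B's whole inner loop for row i = s+1 ≤ m
lemma bInner_eq (m s : Nat) (hs : s < m) (done post : List Int) (hd : done.length = s * m) :
    bInner (m : Int) ((s : Int) + 1)
        (done ++ (List.replicate (m - (s + 1)) 0 ++ (List.replicate (s + 1) 0 ++ post)))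
      = done ++ (rowP m (s + 1) ++ post) := by
  unfold bInner
  have hb := bwrite (m : Int) (((s : Int) + 1 - 1) * (m : Int)) (s + 1)
      ((m : Int) - ((s : Int) + 1)) (done ++ List.replicate (m - (s + 1)) 0)
      (List.replicate (s + 1) 0) post (by simp) (by simp [hd]; push_cast; omega)
  rw [show ((m : Int) - ((s : Int) + 1)) + ((s + 1 : Nat) : Int) = (m : Int) from by
        push_cast; ring] at hb
  have harr : done ++ (List.replicate (m - (s + 1)) (0 : Int) ++ (List.replicate (s + 1) 0 ++ post))
      = (done ++ List.replicate (m - (s + 1)) 0) ++ List.replicate (s + 1) 0 ++ post := by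
    simp only [List.append_assoc]
  rw [harr, hb,
      show (m : Int) - ((m : Int) - ((s : Int) + 1)) = ((s + 1 : Nat) : Int) from by
        push_cast; ring]
  simp [rowP]

-- B's outer loop
lemma bouter (m : Nat) (t : Nat) :
    ∀ (s : Nat) (done : List Int), s + t = m → done.length = s * m →
      (PySem.List.pyRange ((s : Int) + 1) ((m : Int) + 1) 1).foldl
          (fun arr i => bInner (m : Int) i arr) (done ++ List.replicate (t * m) 0)
        = done ++ frT m s t := by
  induction t with
  | zero =>
      intro s done h hd
      rw [PySem.List.pyRange_one_eq_nil (by push_cast; omega)]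
      simp [frT]
  | succ t ih =>
      intro s done h hd
      rw [PySem.List.pyRange_one_cons (by push_cast; omega)]
      simp only [List.foldl_cons]
      have hsplit : done ++ List.replicate ((t + 1) * m) (0 : Int)
          = done ++ (List.replicate (m - (s + 1)) 0
              ++ (List.replicate (s + 1) 0 ++ List.replicate (t * m) 0)) := by
        rw [show (t + 1) * m = (m - (s + 1)) + ((s + 1) + t * m) from by
              rw [Nat.succ_mul]; omega]
        simp only [← List.replicate_append_replicate, List.append_assoc]
      rw [hsplit, bInner_eq m s (by omega) done (List.replicate (t * m) 0) hd,
          show done ++ (rowP m (s + 1) ++ List.replicate (t * m) (0 : Int))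
              = (done ++ rowP m (s + 1)) ++ List.replicate (t * m) 0 from by
            simp only [List.append_assoc],
          show (s : Int) + 1 + 1 = ((s + 1 : Nat) : Int) + 1 from by push_cast; ring,
          ih (s + 1) (done ++ rowP m (s + 1)) (by omega)
            (by simp [rowP, length_descVals, hd, Nat.succ_mul]; omega)]
      simp [frT, List.append_assoc]

-- ===== VERDICT (by name: the statement is the Claim_ definition above) =====
theorem arraySeries_spec : Claim_equal_arraySeries := by
  intro n _
  unfold Spec_arraySeries arraySeries arraySeries_alt
  by_cases hn : n ≤ 0
  · rw [PySem.List.pyRange_neg_one_eq_nil hn,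
        PySem.List.pyRange_one_eq_nil (a := 1) (b := n + 1) (by omega),
        PySem.List.pyRepeat_singleton]
    simp [List.map_const', PySem.List.length_pyRange_one]
  · push_neg at hn
    obtain ⟨m, rfl⟩ : ∃ m : Nat, n = (m : Int) :=
      ⟨n.toNat, (Int.toNat_of_nonneg (by omega)).symm⟩
    have hmm : ((m : Int) * m - 0).toNat = m * m := by
      rw [show ((m : Int) * m - 0) = ((m * m : Nat) : Int) from by push_cast; ring,
          Int.toNat_natCast]
    have hmm' : ((m : Int) * m).toNat = m * m := by
      rw [show ((m : Int) * m) = ((m * m : Nat) : Int) from by push_cast; ring,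
          Int.toNat_natCast]
    have harr : (PySem.List.pyRange 0 ((m : Int) * m) 1).map (fun _ => (0 : Int))
        = List.replicate (m * m) 0 := by
      rw [List.map_const', PySem.List.length_pyRange_one, hmm]
    have hidx : PySem.List.len (List.replicate (m * m) (0 : Int)) - 1
        = ((m : Int)) * m - 1 := by
      simp
    have hA := aouter m m le_rfl []
    rw [List.append_nil] at hA
    have hB := bouter m m 0 [] (by omega) (by simp)
    simp only [List.nil_append, Nat.cast_zero, zero_add, zero_mul] at hB
    simp only [harr, PySem.List.pyRepeat_singleton, hmm']
    rw [hidx, hA, hB]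
    have hfr := frT_eq m m 0
    simp only [frP, List.nil_append, Nat.zero_add] at hfr
    simp [hfr]
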